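-- pv_equiv track=rewrite | github.com/bakingeol/programmers | LV0/LV0_다항식더하기.py | solution
-- ===== SOURCE A (Python) =====
-- def solution(a):
--     a = a.split(' ')
--     count = []
--     count2 = 0
--     counts = 0
--     for i,j in enumerate(a):
--         if 'x' in j:
--             j = list(j)
--             del j[-1]
--             if ''.join(j) == '':
--                 j = '1'
--             count.append(''.join(j))
--         elif j.isdigit() == True:
--             count2 += int(j)
--
--     counts = sum(map(int, count))
--
--     if count2 != 0 and counts ==0:
--         return ''.join([str(count2)])
--     elif count2 != 0 and counts != 0:
--         if counts == 1:
--             return ''.join(['x',' ','+',' ',str(count2)])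
--         return ''.join([str(counts),'x',' ','+',' ',str(count2)])
--     elif count2 == 0 and counts != 0:
--         if counts == 1:
--             return ''.join(['x'])
--         return ''.join([str(counts),'x'])
--     elif count2 ==0 and counts ==0:
--         return ''
-- ===== SOURCE B (Python) =====
-- def solution(a):
--     # Divide-and-conquer: classify each token once, combine (coef, const) pairs
--     # over halves of the token list, then format by joining the nonzero terms.
--     def classify(t):
--         if 'x' in t:
--             body = t[:-1]
--             return (int(body) if body != '' else 1, 0)
--         if t.isdigit():
--             return (0, int(t))
--         return (0, 0)
--
--     def total(toks):
--         if len(toks) == 0: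
--             return (0, 0)
--         if len(toks) == 1:
--             return classify(toks[0])
--         mid = len(toks) // 2
--         c1, k1 = total(toks[:mid])
--         c2, k2 = total(toks[mid:])
--         return (c1 + c2, k1 + k2)
--
--     c, k = total(a.split(' '))
--     xterm = 'x' if c == 1 else str(c) + 'x'
--     parts = ([xterm] if c != 0 else []) + ([str(k)] if k != 0 else [])
--     return ' + '.join(parts)
-- ===== Notes on version B (the rewrite author's own statement) =====
-- stated objective: alternative
-- what changed: B classifies each token once into a (coef, const) pair and combines the pairs by divide-and-conquer recursion over halves of the token list (A runs a left-to-right loop buffering coefficient strings in a list and re-parses them with sum(map(int, ...))), then formats by joining the nonzero terms with the plus separator instead of A's nested if/elif string table.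
import Mathlib
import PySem

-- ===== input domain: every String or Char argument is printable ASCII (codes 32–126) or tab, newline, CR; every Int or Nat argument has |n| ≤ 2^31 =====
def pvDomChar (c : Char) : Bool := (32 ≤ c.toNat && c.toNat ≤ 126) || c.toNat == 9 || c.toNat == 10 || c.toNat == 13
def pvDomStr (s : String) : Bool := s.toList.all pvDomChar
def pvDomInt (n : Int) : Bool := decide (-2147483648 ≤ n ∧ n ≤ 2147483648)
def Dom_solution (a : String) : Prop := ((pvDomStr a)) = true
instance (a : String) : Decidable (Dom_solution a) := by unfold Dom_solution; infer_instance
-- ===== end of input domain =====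

-- B classifies each token once into a (coef, const) pair and combines the pairs by a
-- divide-and-conquer recursion over halves of the token list (instead of A's left-to-right
-- loop that buffers coefficient strings and re-parses them with sum(map(int, ...))), then
-- formats the answer by joining the nonzero terms with the plus separator instead of A's nested if/elif table.

-- ===== PORT A =====

-- int(s); Pre_solution guarantees the parse succeeds wherever A applies it
def pintA (s : String) : Int := (PySem.Int.ofStr? s).getD 0

-- loop body of 'for i,j in enumerate(a)' (i is unused by A's body)
def bodyA (st : List String × Int) (j : String) : List String × Int :=
  if PySem.Str.isIn "x" j then
    -- j = list(j); del j[-1]; ''.join(j) — the string of all but the last character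
    let cs := j.toList.dropLast
    let s' := if String.ofList cs = "" then "1" else String.ofList cs
    (st.1 ++ [s'], st.2)
  else if PySem.Str.strIsdigit j then
    (st.1, st.2 + pintA j)
  else st

def solution (a : String) : String :=
  let toks := (PySem.Str.split? a " ").getD []
  let st := (PySem.List.enumerate toks 0).foldl (fun st ij => bodyA st ij.2) ([], 0)
  let count2 := st.2
  let counts := (st.1.map pintA).sum
  if count2 ≠ 0 ∧ counts = 0 then PySem.Str.join "" [PySem.Int.toStr count2]
  else if count2 ≠ 0 ∧ counts ≠ 0 then
    if counts = 1 then PySem.Str.join "" ["x", " ", "+", " ", PySem.Int.toStr count2]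
    else PySem.Str.join "" [PySem.Int.toStr counts, "x", " ", "+", " ", PySem.Int.toStr count2]
  else if count2 = 0 ∧ counts ≠ 0 then
    if counts = 1 then PySem.Str.join "" ["x"]
    else PySem.Str.join "" [PySem.Int.toStr counts, "x"]
  else ""

-- ===== PORT B =====

-- classify(t): the (coef, const) contribution of one token
def classifyB (t : String) : Int × Int :=
  if PySem.Str.isIn "x" t then
    let body := PySem.Str.slice t none (some (-1))   -- t[:-1]
    ((if body ≠ "" then (PySem.Int.ofStr? body).getD 0 else 1), 0)
  else if PySem.Str.strIsdigit t then (0, (PySem.Int.ofStr? t).getD 0)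
  else (0, 0)

-- total(toks): divide-and-conquer combination of the classify pairs.
-- Python's mid = len(toks)//2 on a nonnegative int is exactly Nat division.
def totalB (toks : List String) : Int × Int :=
  if toks.length = 0 then (0, 0)
  else if toks.length = 1 then classifyB ((PySem.List.pyGet? toks 0).getD "")
  else
    let mid : Nat := toks.length / 2
    let p1 := totalB (PySem.List.slice toks none (some (mid : Int)))   -- toks[:mid]
    let p2 := totalB (PySem.List.slice toks (some (mid : Int)) none)   -- toks[mid:]
    (p1.1 + p2.1, p1.2 + p2.2)
termination_by toks.length
decreasing_by
  · simp only [PySem.List.slice_to_natCast, List.length_take]; omega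
  · simp only [PySem.List.slice_from_natCast, List.length_drop]; omega

def solution_alt (a : String) : String :=
  let p := totalB ((PySem.Str.split? a " ").getD [])
  let xterm := if p.1 = 1 then "x" else PySem.Str.join "" [PySem.Int.toStr p.1, "x"]
  let parts := (if p.1 ≠ 0 then [xterm] else []) ++ (if p.2 ≠ 0 then [PySem.Int.toStr p.2] else [])
  PySem.Str.join " + " parts

-- ===== PRECONDITION & SPEC =====
-- Pre_ excludes exactly the inputs on which A raises ValueError (a token containing the variable letter whose
-- prefix before the last character is nonempty and not int()-parsable); B raises there too.
def Pre_solution (a : String) : Prop :=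
  ∀ t ∈ (PySem.Str.split? a " ").getD [], PySem.Str.isIn "x" t = true →
    t.toList.dropLast ≠ [] → (PySem.Int.ofChars? t.toList.dropLast).isSome
instance (a : String) : Decidable (Pre_solution a) := by unfold Pre_solution; infer_instance
def pvWitness_solution : String := "3x + 7 + x"

def Spec_solution (a : String) (out : String) : Prop := out = solution_alt a
instance (a : String) (out : String) : Decidable (Spec_solution a out) := by unfold Spec_solution; infer_instance

-- ===== CLAIM (what is proved, stated in full; the proofs are below) =====
def Claim_equal_solution : Prop := ∀ (a : String), Dom_solution a → Pre_solution a → Spec_solution a (solution a)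

-- ===== LEMMAS AND PROOFS =====

-- folding over enumerate with the index unused is folding over the list
theorem foldl_enumerate_snd {α σ : Type} (f : σ → α → σ) :
    ∀ (xs : List α) (s : Int) (init : σ),
      (PySem.List.enumerate xs s).foldl (fun st ij => f st ij.2) init = xs.foldl f init := by
  intro xs
  induction xs with
  | nil => intro s init; simp [PySem.List.enumerate_nil]
  | cons x xs ih => intro s init; simp [PySem.List.enumerate_cons, ih]

theorem pintA_one : pintA "1" = 1 := by decide

theorem slice_neg_one_str (j : String) :
    PySem.Str.slice j none (some (-1)) = String.ofList j.toList.dropLast := by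
  apply String.toList_inj.mp
  simp [PySem.List.slice_to_neg_one, String.toList_ofList]

-- A's accumulators are the sums of the classify pairs
theorem foldA_sum :
    ∀ (toks : List String) (l : List String) (n : Int),
      ((toks.foldl bodyA (l, n)).1.map pintA).sum
          = (l.map pintA).sum + (toks.map (fun t => (classifyB t).1)).sum
      ∧ (toks.foldl bodyA (l, n)).2
          = n + (toks.map (fun t => (classifyB t).2)).sum := by
  intro toks
  induction toks with
  | nil => intro l n; simp
  | cons j toks ih =>
    intro l n
    simp only [List.foldl_cons, List.map_cons, List.sum_cons]
    by_cases hx : PySem.Chars.isIn ['x'] j.toList = true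
    · have hb : bodyA (l, n) j = (l ++ [if String.ofList j.toList.dropLast = "" then "1"
          else String.ofList j.toList.dropLast], n) := by
        simp [bodyA, hx]
      obtain ⟨h1, h2⟩ := ih (l ++ [if String.ofList j.toList.dropLast = "" then "1"
          else String.ofList j.toList.dropLast]) n
      rw [hb, h1, h2]
      refine ⟨?_, by simp [classifyB, hx]; try ring⟩
      by_cases hnil : j.toList.dropLast = []
      · simp [hnil, pintA_one, classifyB, hx, slice_neg_one_str]; try ring
      · simp [hnil, pintA, classifyB, hx, slice_neg_one_str]; try ring
    · by_cases hd : PySem.Chars.strIsdigit j.toList = true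
      · have hb : bodyA (l, n) j = (l, n + pintA j) := by simp [bodyA, hx, hd]
        obtain ⟨h1, h2⟩ := ih l (n + pintA j)
        rw [hb, h1, h2]
        exact ⟨by simp [classifyB, hx, hd]; try ring, by simp [classifyB, hx, hd, pintA]; try ring⟩
      · have hb : bodyA (l, n) j = (l, n) := by simp [bodyA, hx, hd]
        obtain ⟨h1, h2⟩ := ih l n
        rw [hb, h1, h2]
        exact ⟨by simp [classifyB, hx, hd], by simp [classifyB, hx, hd]⟩

-- B's divide-and-conquer computes the same two sums
theorem totalB_sum :
    ∀ (toks : List String),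
      totalB toks = ((toks.map (fun t => (classifyB t).1)).sum,
                     (toks.map (fun t => (classifyB t).2)).sum) := by
  intro toks
  induction toks using totalB.induct with
  | case1 toks h0 =>
    have : toks = [] := List.length_eq_zero_iff.mp h0
    subst this; simp [totalB]
  | case2 toks h0 h1 =>
    obtain ⟨t, ht⟩ := List.length_eq_one_iff.mp h1
    subst ht
    simp [totalB]
  | case3 toks h0 h1 mid ih1 ih2 =>
    rw [totalB]
    simp only [h0, h1, if_false]
    rw [ih1, ih2]
    have hsplit : PySem.List.slice toks none (some (mid : Int))
        ++ PySem.List.slice toks (some (mid : Int)) none = toks := by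
      rw [PySem.List.slice_to, PySem.List.slice_from, List.take_append_drop] <;> positivity
    rw [Prod.mk.injEq]
    refine ⟨?_, ?_⟩ <;>
    · conv_rhs => rw [← hsplit]
      simp only [List.map_append, List.sum_append]

-- joining two parts with ' + ' is the concatenation A spells out character by character
theorem join_two (p q : String) :
    PySem.Str.join " + " [p, q] = PySem.Str.join "" [p, " ", "+", " ", q] := by
  apply String.toList_inj.mp
  simp [PySem.Str.join, PySem.Chars.join_cons_cons, PySem.Chars.join_singleton]

theorem join_nil (sep : String) : PySem.Str.join sep [] = "" := by
  apply String.toList_inj.mp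
  simp [PySem.Str.join, PySem.Chars.join_nil]

-- ''.join with an already-joined first element flattens
theorem join_flat (p q : String) (rest : List String) :
    PySem.Str.join "" (PySem.Str.join "" [p, q] :: rest) = PySem.Str.join "" (p :: q :: rest) := by
  apply String.toList_inj.mp
  cases rest with
  | nil =>
    simp [PySem.Str.join, PySem.Chars.join_singleton, PySem.Chars.join_cons_cons]
  | cons r rs =>
    simp [PySem.Str.join, PySem.Chars.join_cons_cons, PySem.Chars.join_singleton, List.append_assoc]

theorem join_one (sep p : String) : PySem.Str.join sep [p] = p := by
  apply String.toList_inj.mp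
  simp [PySem.Str.join, PySem.Chars.join_singleton]

-- ===== VERDICT (by name: the statement is the Claim_ definition above) =====
theorem solution_spec : Claim_equal_solution := by
  intro a _ _
  unfold Spec_solution solution solution_alt
  dsimp only
  rw [foldl_enumerate_snd]
  obtain ⟨h1, h2⟩ := foldA_sum ((PySem.Str.split? a " ").getD []) [] 0
  simp only [List.map_nil, List.sum_nil, zero_add] at h1 h2
  rw [h1, h2, totalB_sum]
  set coef := ((((PySem.Str.split? a " ").getD []).map (fun t => (classifyB t).1)).sum) with hc
  set cst := ((((PySem.Str.split? a " ").getD []).map (fun t => (classifyB t).2)).sum) with hn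
  by_cases h2' : cst = 0 <;> by_cases h1' : coef = 0
  · simp [h1', h2', join_nil]
  · by_cases he : coef = 1
    · simp [h2', he, join_one]
    · simp [h1', h2', he, join_one]
  · simp [h1', h2', join_one]
  · by_cases he : coef = 1
    · simp [h2', he, join_two]
    · simp [h1', h2', he, join_two, join_flat]
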